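-- pv_equiv track=rewrite | github.com/Mr-VS/AI2 | AI2_2.py | goal_score
-- ===== SOURCE A (Python) =====
-- def possible_action(black,white,char): #char tells us the possible action for whichever piece (B/W) we want to move
--     action=[]
--     direction={}
--     possible_capture=0
--     capture=0
--     if char=='W':
--         for w in white:
--             #if(white[w][0]-1>=0 and white[w][1]+1<8 and white[w][1]-1>=0):
--                 #if nothing is in front and its insde the box
--                 if(((white[w][0]-1, white[w][1]) not in black.values()) and ((white[w][0]-1, white[w][1]) not in white.values()) and white[w][0]-1>=0):
--                     action.append((w,(white[w][0]-1, white[w][1])))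
--                     #direction[w]=['F']
--                 #if possible move left
--                 if(((white[w][0]-1, white[w][1]-1) not in white.values()) and white[w][0]-1>=0 and white[w][1]-1>=0):
--                     action.append((w, (white[w][0]-1, white[w][1]-1)))
--                     #direction[w].append('L')
--                 #if possible move right
--                 if(((white[w][0]-1, white[w][1]+1) not in white.values()) and white[w][0]-1>=0 and white[w][1]+1<8):
--                     action.append((w, (white[w][0]-1, white[w][1]+1)))
--                     #direction[w].append('R')
--                 #check if there is a black piece on the rigth
--                 if(((white[w][0]-1, white[w][1]+1) in black.values())): # if there is a black player on the right increment possible_capture for the score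
--                     possible_capture+=1
--                 #check if there is a black piece on the left
--                 if(((white[w][0]-1, white[w][1]-1) in black.values())):
--                     possible_capture+=1
--                 if (white[w][0], white[w][1]) in black.values():
--                     capture += 1
--
--         return action, possible_capture, capture
--     elif char=='B':
--         for b in black:
--             #if(black[b][0]+1<8 and black[b][1]+1<8 and black[b][1]-1>=0):
--                 #if nothing is in front and its insde the box
--                 if(((black[b][0]+1, black[b][1]) not in black.values()) and ((black[b][0]+1, black[b][1]) not in white.values()) and black[b][0]+1<8):
--                     action.append((b,(black[b][0]+1, black[b][1])))
--                     #direction[b]=['F']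
--                 #if possible move left
--                 if(((black[b][0]+1, black[b][1]-1) not in black.values()) and black[b][0]+1<8 and black[b][1]-1>=0):
--                     action.append((b, (black[b][0]+1, black[b][1]-1)))
--                     #direction[b].append('L')
--                 #if possible move right
--                 if(((black[b][0]+1, black[b][1]+1) not in black.values()) and black[b][0]+1<8 and black[b][1]+1<8):
--                     action.append((b, (black[b][0]+1, black[b][1]+1)))
--                     #direction[b].append('R')
--                 #check if there is a white piece on the right
--                 if(((black[b][0]+1, black[b][1]+1) in white.values())):# if there is a white player on the right increment possible_capture for the score
--                     possible_capture+=1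
--                 #check if there is a white piece on the left
--                 if(((black[b][0]+1, black[b][1]-1) in white.values())):
--                     possible_capture+=1
--                 if (black[b][0], black[b][1]) in white.values():
--                     capture += 1
--
--         return action, possible_capture, capture
--
-- def goal_score(black,white,char):
--     istrue=False
--     if(char=='W'):
--         action, possible_capture, capture=possible_action(black,white,'W')
--         for vals in action:
--             if(vals[1][0]==0):
--                 istrue=True
--         if(istrue):
--             return True
--     elif(char=='B'):
--         action, possible_capture, capture=possible_action(black,white,'B')
--         for vals in action:
--             if(vals[1][0]==7):
--                 istrue=True
--         if(istrue):
--             return True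
--     else:
--         return False
-- ===== SOURCE B (Python) =====
-- def goal_score(black, white, char):
--     if char == 'W':
--         bvals = set(black.values())
--         wvals = set(white.values())
--         for (r, c) in white.values():
--             if r == 1 and (((0, c) not in bvals and (0, c) not in wvals)
--                            or (c - 1 >= 0 and (0, c - 1) not in wvals)
--                            or (c + 1 < 8 and (0, c + 1) not in wvals)):
--                 return True
--         return None
--     elif char == 'B':
--         bvals = set(black.values())
--         wvals = set(white.values())
--         for (r, c) in black.values():
--             if r == 6 and (((7, c) not in bvals and (7, c) not in wvals)
--                            or (c - 1 >= 0 and (7, c - 1) not in bvals)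
--                            or (c + 1 < 8 and (7, c + 1) not in bvals)):
--                 return True
--         return None
--     else:
--         return False
-- ===== Notes on version B (the rewrite author's own statement) =====
-- stated objective: alternative
-- what changed: Instead of generating the full move list (with capture counters) for every piece via possible_action and then scanning that list for a goal-row move, B precomputes the two occupied-cell sets once and does a single pass that tests only pieces on the rank adjacent to the goal row, short-circuiting on the first hit.
import Mathlib
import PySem

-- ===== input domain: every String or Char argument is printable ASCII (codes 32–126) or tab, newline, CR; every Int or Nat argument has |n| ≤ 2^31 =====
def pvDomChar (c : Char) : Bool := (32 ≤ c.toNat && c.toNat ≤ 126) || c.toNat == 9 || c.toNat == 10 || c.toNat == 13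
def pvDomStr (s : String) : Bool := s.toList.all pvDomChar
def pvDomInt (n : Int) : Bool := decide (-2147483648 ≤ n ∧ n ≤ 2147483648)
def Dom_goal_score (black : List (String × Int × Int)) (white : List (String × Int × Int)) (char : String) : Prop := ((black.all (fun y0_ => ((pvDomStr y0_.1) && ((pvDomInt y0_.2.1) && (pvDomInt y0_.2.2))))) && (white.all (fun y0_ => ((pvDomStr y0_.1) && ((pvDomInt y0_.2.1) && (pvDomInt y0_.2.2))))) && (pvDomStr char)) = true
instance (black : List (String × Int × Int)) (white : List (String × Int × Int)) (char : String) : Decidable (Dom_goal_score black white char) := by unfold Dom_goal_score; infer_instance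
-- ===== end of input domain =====

-- B replaces A's full move-generation pass with a single scan that tests only pieces on the
-- rank adjacent to the goal row against precomputed occupied-cell sets (objective: alternative).


-- ===== PORT A =====
-- one iteration of A's 'for w in white' loop (char == 'W'); state = (action, possible_capture, capture)
def pvStepW (bv wv : List (Int × Int)) (s : List (String × Int × Int) × Int × Int)
    (p : String × Int × Int) : List (String × Int × Int) × Int × Int :=
  let w := p.1; let r := p.2.1; let c := p.2.2
  let action := if (r-1, c) ∉ bv ∧ (r-1, c) ∉ wv ∧ r-1 ≥ 0 then s.1 ++ [(w, r-1, c)] else s.1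
  let action := if (r-1, c-1) ∉ wv ∧ r-1 ≥ 0 ∧ c-1 ≥ 0 then action ++ [(w, r-1, c-1)] else action
  let action := if (r-1, c+1) ∉ wv ∧ r-1 ≥ 0 ∧ c+1 < 8 then action ++ [(w, r-1, c+1)] else action
  let pc := if (r-1, c+1) ∈ bv then s.2.1 + 1 else s.2.1
  let pc := if (r-1, c-1) ∈ bv then pc + 1 else pc
  let cap := if (r, c) ∈ bv then s.2.2 + 1 else s.2.2
  (action, pc, cap)

-- one iteration of A's 'for b in black' loop (char == 'B')
def pvStepB (bv wv : List (Int × Int)) (s : List (String × Int × Int) × Int × Int)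
    (p : String × Int × Int) : List (String × Int × Int) × Int × Int :=
  let b := p.1; let r := p.2.1; let c := p.2.2
  let action := if (r+1, c) ∉ bv ∧ (r+1, c) ∉ wv ∧ r+1 < 8 then s.1 ++ [(b, r+1, c)] else s.1
  let action := if (r+1, c-1) ∉ bv ∧ r+1 < 8 ∧ c-1 ≥ 0 then action ++ [(b, r+1, c-1)] else action
  let action := if (r+1, c+1) ∉ bv ∧ r+1 < 8 ∧ c+1 < 8 then action ++ [(b, r+1, c+1)] else action
  let pc := if (r+1, c+1) ∈ wv then s.2.1 + 1 else s.2.1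
  let pc := if (r+1, c-1) ∈ wv then pc + 1 else pc
  let cap := if (r, c) ∈ wv then s.2.2 + 1 else s.2.2
  (action, pc, cap)

-- A's possible_action; 'for w in white: … white[w] …' over a dict = iterating its items
def possible_action_port (bd wd : PySem.Dict String (Int × Int)) (char : String) :
    Option (List (String × Int × Int) × Int × Int) :=
  if char = "W" then some (wd.items.foldl (pvStepW bd.values wd.values) ([], 0, 0))
  else if char = "B" then some (bd.items.foldl (pvStepB bd.values wd.values) ([], 0, 0))
  else none  -- Python falls off the end: returns None

def goal_score (black : List (String × Int × Int)) (white : List (String × Int × Int)) (char : String) : Option Bool :=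
  if char = "W" then
    match possible_action_port (PySem.Dict.ofList black) (PySem.Dict.ofList white) "W" with
    | some (action, _pc, _cap) =>
      if action.foldl (fun ist vals => if vals.2.1 = 0 then true else ist) false then some true else none
    | none => none  -- unreachable: possible_action("W") always returns a triple
  else if char = "B" then
    match possible_action_port (PySem.Dict.ofList black) (PySem.Dict.ofList white) "B" with
    | some (action, _pc, _cap) =>
      if action.foldl (fun ist vals => if vals.2.1 = 7 then true else ist) false then some true else none
    | none => none
  else some false

-- ===== PORT B =====
-- can a white piece (r,c) (necessarily r = 1) step onto goal row 0?
def pvHitW (bv wv : List (Int × Int)) (v : Int × Int) : Bool :=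
  decide (v.1 = 1 ∧ (((0, v.2) ∉ bv ∧ (0, v.2) ∉ wv)
    ∨ (v.2 - 1 ≥ 0 ∧ (0, v.2 - 1) ∉ wv)
    ∨ (v.2 + 1 < 8 ∧ (0, v.2 + 1) ∉ wv)))

-- can a black piece (r,c) (necessarily r = 6) step onto goal row 7?
def pvHitB (bv wv : List (Int × Int)) (v : Int × Int) : Bool :=
  decide (v.1 = 6 ∧ (((7, v.2) ∉ bv ∧ (7, v.2) ∉ wv)
    ∨ (v.2 - 1 ≥ 0 ∧ (7, v.2 - 1) ∉ bv)
    ∨ (v.2 + 1 < 8 ∧ (7, v.2 + 1) ∉ bv)))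

def goal_score_alt (black : List (String × Int × Int)) (white : List (String × Int × Int)) (char : String) : Option Bool :=
  if char = "W" then
    let bvals : PySem.Set (Int × Int) := PySem.Set.ofList (PySem.Dict.ofList black).values
    let wvals : PySem.Set (Int × Int) := PySem.Set.ofList (PySem.Dict.ofList white).values
    if (PySem.Dict.ofList white).values.any (pvHitW bvals wvals) then some true else none
  else if char = "B" then
    let bvals : PySem.Set (Int × Int) := PySem.Set.ofList (PySem.Dict.ofList black).values
    let wvals : PySem.Set (Int × Int) := PySem.Set.ofList (PySem.Dict.ofList white).values
    if (PySem.Dict.ofList black).values.any (pvHitB bvals wvals) then some true else none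
  else some false

-- ===== PRECONDITION & SPEC =====
def Spec_goal_score (black : List (String × Int × Int)) (white : List (String × Int × Int)) (char : String) (out : Option Bool) : Prop := out = goal_score_alt black white char
instance (black : List (String × Int × Int)) (white : List (String × Int × Int)) (char : String) (out : Option Bool) : Decidable (Spec_goal_score black white char out) := by unfold Spec_goal_score; infer_instance

-- ===== CLAIM (what is proved, stated in full; the proofs are below) =====
def Claim_equal_goal_score : Prop := ∀ (black : List (String × Int × Int)) (white : List (String × Int × Int)) (char : String), Dom_goal_score black white char → Spec_goal_score black white char (goal_score black white char)

-- ===== LEMMAS AND PROOFS =====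

-- A's 'istrue' loop is an 'any'
theorem pv_foldl_iftrue {α : Type} (p : α → Prop) [DecidablePred p] (l : List α) (b : Bool) :
    l.foldl (fun acc x => if p x then true else acc) b = (b || l.any fun x => decide (p x)) := by
  induction l generalizing b with
  | nil => simp
  | cons x xs ih =>
    simp only [List.foldl_cons, List.any_cons]
    rw [ih]
    split_ifs with h <;> simp [h]

theorem pv_stepW_fst_any (bv wv : List (Int × Int)) (s : List (String × Int × Int) × Int × Int)
    (p : String × Int × Int) :
    ((pvStepW bv wv s p).1).any (fun e => decide (e.2.1 = 0))
      = (s.1.any (fun e => decide (e.2.1 = 0)) || pvHitW bv wv p.2) := by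
  obtain ⟨w, r, c⟩ := p
  by_cases hr : r = 1
  · subst hr
    simp only [pvStepW, pvHitW]
    norm_num
    by_cases hb : ((0 : Int), c) ∈ bv <;> by_cases hw0 : ((0 : Int), c) ∈ wv <;>
      by_cases hw1 : ((0 : Int), c - 1) ∈ wv <;> by_cases hw2 : ((0 : Int), c + 1) ∈ wv <;>
      split_ifs <;> simp_all
  · simp only [pvStepW, pvHitW]
    have h1 : ¬(r - 1 = 0) := by omega
    split_ifs <;> simp_all

theorem pv_stepB_fst_any (bv wv : List (Int × Int)) (s : List (String × Int × Int) × Int × Int)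
    (p : String × Int × Int) :
    ((pvStepB bv wv s p).1).any (fun e => decide (e.2.1 = 7))
      = (s.1.any (fun e => decide (e.2.1 = 7)) || pvHitB bv wv p.2) := by
  obtain ⟨b, r, c⟩ := p
  by_cases hr : r = 6
  · subst hr
    simp only [pvStepB, pvHitB]
    norm_num
    by_cases hb : ((7 : Int), c) ∈ bv <;> by_cases hw0 : ((7 : Int), c) ∈ wv <;>
      by_cases hb1 : ((7 : Int), c - 1) ∈ bv <;> by_cases hb2 : ((7 : Int), c + 1) ∈ bv <;>
      split_ifs <;> simp_all
  · simp only [pvStepB, pvHitB]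
    have h1 : ¬(r + 1 = 7) := by omega
    split_ifs <;> simp_all

theorem pv_foldW_any (bv wv : List (Int × Int)) (items : List (String × Int × Int)) :
    ∀ s : List (String × Int × Int) × Int × Int,
    ((items.foldl (pvStepW bv wv) s).1).any (fun e => decide (e.2.1 = 0))
      = (s.1.any (fun e => decide (e.2.1 = 0)) || items.any (fun p => pvHitW bv wv p.2)) := by
  induction items with
  | nil => simp
  | cons p items ih =>
    intro s
    simp only [List.foldl_cons, List.any_cons]
    rw [ih, pv_stepW_fst_any]
    simp [Bool.or_assoc]

theorem pv_foldB_any (bv wv : List (Int × Int)) (items : List (String × Int × Int)) :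
    ∀ s : List (String × Int × Int) × Int × Int,
    ((items.foldl (pvStepB bv wv) s).1).any (fun e => decide (e.2.1 = 7))
      = (s.1.any (fun e => decide (e.2.1 = 7)) || items.any (fun p => pvHitB bv wv p.2)) := by
  induction items with
  | nil => simp
  | cons p items ih =>
    intro s
    simp only [List.foldl_cons, List.any_cons]
    rw [ih, pv_stepB_fst_any]
    simp [Bool.or_assoc]

theorem pv_hitW_ofList (bv wv : List (Int × Int)) (v : Int × Int) :
    pvHitW (PySem.Set.ofList bv) (PySem.Set.ofList wv) v = pvHitW bv wv v := by
  simp only [pvHitW, PySem.Set.mem_ofList]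

theorem pv_hitB_ofList (bv wv : List (Int × Int)) (v : Int × Int) :
    pvHitB (PySem.Set.ofList bv) (PySem.Set.ofList wv) v = pvHitB bv wv v := by
  simp only [pvHitB, PySem.Set.mem_ofList]

-- ===== VERDICT (by name: the statement is the Claim_ definition above) =====
theorem goal_score_spec : Claim_equal_goal_score := by
  intro black white char _dom
  unfold Spec_goal_score
  by_cases hW : char = "W"
  · subst hW
    simp only [goal_score, goal_score_alt, possible_action_port, reduceIte]
    rw [pv_foldl_iftrue (fun vals : String × Int × Int => vals.2.1 = 0), pv_foldW_any]
    have hv : (PySem.Dict.ofList white).values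
        = (PySem.Dict.ofList white).items.map (·.2) := rfl
    rw [hv, List.any_map]
    simp only [Function.comp_def, pv_hitW_ofList, List.any_nil, Bool.false_or]
  · by_cases hB : char = "B"
    · subst hB
      simp only [goal_score, goal_score_alt, possible_action_port, if_neg hW, reduceIte]
      rw [pv_foldl_iftrue (fun vals : String × Int × Int => vals.2.1 = 7), pv_foldB_any]
      have hv : (PySem.Dict.ofList black).values
          = (PySem.Dict.ofList black).items.map (·.2) := rfl
      rw [hv, List.any_map]
      simp only [Function.comp_def, pv_hitB_ofList, List.any_nil, Bool.false_or]
    · simp [goal_score, goal_score_alt, hW, hB]
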